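-- pv_equiv track=rewrite | github.com/KuphJr/SecureSecretSplitter | decoder.py | convertBase62toBase10
-- ===== SOURCE A (Python) =====
-- def convertBase62toBase10(base62):
--     # converts single input from base-62 (alphanumeric) representation to base-10 representation
--     base62table = ["A","B","C","D","E","F","G","H","I","J","K","L","M","N","O","P","Q","R","S",
--                     "T","U","V","W","X","Y","Z","a","b","c","d","e","f","g","h","i","j","k","l",
--                     "m","n","o","p","q","r","s","t","u","v","w","x","y","z","0","1","2","3","4",
--                     "5","6","7","8","9"]
--     if base62 == "":
--         return 0
--     else:
--         lastChar = base62[-1:]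
--         base10 = base62table.index(lastChar)
--         remainingChar = base62[:-1]
--         return base10 + 62 * convertBase62toBase10(remainingChar)
-- ===== SOURCE B (Python) =====
-- def convertBase62toBase10(base62):
--     # converts single input from base-62 (alphanumeric) representation to base-10 representation
--     base62table = ["A","B","C","D","E","F","G","H","I","J","K","L","M","N","O","P","Q","R","S",
--                     "T","U","V","W","X","Y","Z","a","b","c","d","e","f","g","h","i","j","k","l",
--                     "m","n","o","p","q","r","s","t","u","v","w","x","y","z","0","1","2","3","4",
--                     "5","6","7","8","9"]
--     result = 0
--     for c in base62:
--         result = result * 62 + base62table.index(c)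
--     return result
-- ===== Notes on version B (the rewrite author's own statement) =====
-- stated objective: faster
-- what changed: Replaced the right-to-left recursion (last char + 62 * recurse on the sliced-off prefix) with a single left-to-right iterative Horner loop (result = result*62 + digit), keeping the same table and .index so invalid characters still raise ValueError.
import Mathlib
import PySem

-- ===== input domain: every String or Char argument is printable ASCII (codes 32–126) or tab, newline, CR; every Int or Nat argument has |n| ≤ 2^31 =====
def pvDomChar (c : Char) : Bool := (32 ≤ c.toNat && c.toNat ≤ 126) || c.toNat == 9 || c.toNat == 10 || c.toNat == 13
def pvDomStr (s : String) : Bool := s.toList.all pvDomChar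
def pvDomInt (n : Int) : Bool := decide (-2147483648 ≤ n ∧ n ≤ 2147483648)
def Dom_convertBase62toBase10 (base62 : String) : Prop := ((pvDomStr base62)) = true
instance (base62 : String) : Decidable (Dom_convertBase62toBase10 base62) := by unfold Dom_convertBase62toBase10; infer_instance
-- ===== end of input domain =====

-- B replaces A's right-to-left recursion with a left-to-right iterative Horner loop (same table, same .index / ValueError behaviour).

-- ===== PORT A =====
-- the 62-entry alphanumeric table (A's base62table, one Char per one-char string)
def pvTableA : List Char :=
  "ABCDEFGHIJKLMNOPQRSTUVWXYZabcdefghijklmnopqrstuvwxyz0123456789".toList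

-- A's recursion "index of last char + 62 * recurse on the prefix", encoded as
-- structural recursion over the reversed character list (head = last char).
def pvARec : List Char → Int
  | [] => 0
  | c :: rest => (((PySem.List.index? pvTableA c).getD 0 : Nat) : Int) + 62 * pvARec rest

def convertBase62toBase10 (base62 : String) : Int :=
  pvARec base62.toList.reverse

-- ===== PORT B =====
def pvTableB : List Char :=
  "ABCDEFGHIJKLMNOPQRSTUVWXYZabcdefghijklmnopqrstuvwxyz0123456789".toList

def convertBase62toBase10_alt (base62 : String) : Int :=
  base62.toList.foldl
    (fun result c => result * 62 + (((PySem.List.index? pvTableB c).getD 0 : Nat) : Int)) 0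

-- ===== PRECONDITION & SPEC =====
-- Pre_ excludes strings containing a character not in the base-62 table: on those
-- Python A (and B) raise ValueError from .index.
def pvBase62Chars : List Char :=
  "ABCDEFGHIJKLMNOPQRSTUVWXYZabcdefghijklmnopqrstuvwxyz0123456789".toList
def Pre_convertBase62toBase10 (base62 : String) : Prop :=
  (base62.toList.all (fun c => pvBase62Chars.contains c)) = true
instance (base62 : String) : Decidable (Pre_convertBase62toBase10 base62) := by
  unfold Pre_convertBase62toBase10; infer_instance
def pvWitness_convertBase62toBase10 : String := "Ab3"

def Spec_convertBase62toBase10 (base62 : String) (out : Int) : Prop := out = convertBase62toBase10_alt base62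
instance (base62 : String) (out : Int) : Decidable (Spec_convertBase62toBase10 base62 out) := by unfold Spec_convertBase62toBase10; infer_instance

-- ===== CLAIM (what is proved, stated in full; the proofs are below) =====
def Claim_equal_convertBase62toBase10 : Prop := ∀ (base62 : String), Dom_convertBase62toBase10 base62 → Pre_convertBase62toBase10 base62 → Spec_convertBase62toBase10 base62 (convertBase62toBase10 base62)

-- ===== LEMMAS AND PROOFS =====

theorem pvHorner_eq_rec (l : List Char) :
    l.foldl (fun result c => result * 62 + (((PySem.List.index? pvTableB c).getD 0 : Nat) : Int)) 0
      = pvARec l.reverse := by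
  induction l using List.reverseRecOn with
  | nil => rfl
  | append_singleton l c ih =>
      rw [List.foldl_append, List.reverse_append]
      simp only [List.foldl, ih]
      simp only [List.reverse_singleton, List.singleton_append, pvARec, pvTableA, pvTableB]
      ring

-- ===== VERDICT (by name: the statement is the Claim_ definition above) =====
theorem convertBase62toBase10_spec : Claim_equal_convertBase62toBase10 := by
  intro s _ _
  unfold Spec_convertBase62toBase10 convertBase62toBase10 convertBase62toBase10_alt
  exact (pvHorner_eq_rec s.toList).symm
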